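-- pv_equiv track=rewrite | github.com/kevinim/PythonPractice | 신고결과받기1.py | solution
-- ===== SOURCE A (Python) =====
-- def solution(id_list, report, k):
--     reportHash = {}
--     resultHash = {}
--
--     for r in report:
--         user, bad = r.split()
--         if user not in reportHash:
--             reportHash[user] = set()
--         reportHash[user].add(bad)
--
--         if bad not in resultHash:
--             resultHash[bad] = set()
--         resultHash[bad].add(user)
--
--     answer = [0 for _ in range(len(id_list))]
--
--     for i in range(len(id_list)):
--         user = id_list[i]
--         if user not in reportHash:
--             continue
--
--         for bad in reportHash[user]:
--             if len(resultHash[bad]) >= k: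
--                 answer[i] += 1
--
--     return answer
-- ===== SOURCE B (Python) =====
-- def solution(id_list, report, k):
--     # one dict: bad user -> set of distinct reporters
--     reporters = {}
--     for r in report:
--         user, bad = r.split()
--         reporters.setdefault(bad, set()).add(user)
--
--     counts = {}
--     for users in reporters.values():
--         if len(users) >= k:
--             for u in users:
--                 counts[u] = counts.get(u, 0) + 1
--
--     return [counts.get(uid, 0) for uid in id_list]
-- ===== Notes on version B (the rewrite author's own statement) =====
-- stated objective: simpler
-- what changed: B builds only one dict (bad user -> set of reporters), tallies rewards per reporter into a counts dict by iterating that dict once, and projects through id_list at the end; A builds two mirror dicts and runs an index loop over id_list with a nested lookup loop incrementing answer[i].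
import Mathlib
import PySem

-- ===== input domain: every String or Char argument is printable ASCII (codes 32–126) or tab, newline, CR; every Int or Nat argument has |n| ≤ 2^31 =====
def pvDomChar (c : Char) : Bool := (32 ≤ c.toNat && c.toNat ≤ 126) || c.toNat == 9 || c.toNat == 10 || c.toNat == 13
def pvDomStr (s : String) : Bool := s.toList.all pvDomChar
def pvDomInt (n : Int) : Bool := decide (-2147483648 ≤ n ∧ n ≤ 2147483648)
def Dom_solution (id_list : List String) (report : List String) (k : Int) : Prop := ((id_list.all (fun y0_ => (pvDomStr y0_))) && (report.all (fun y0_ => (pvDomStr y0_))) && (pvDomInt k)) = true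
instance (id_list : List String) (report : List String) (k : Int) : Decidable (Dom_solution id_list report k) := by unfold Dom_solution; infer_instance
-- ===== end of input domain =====

-- B replaces A's two mirror dicts + index loop over id_list by one dict (bad -> reporters),
-- a single pass tallying rewards per reporter, and a final projection through id_list (objective: simpler).

-- ===== PORT A =====
-- one iteration of A's first loop, updating (reportHash, resultHash); the '_' arm is where
-- Python raises ValueError on unpacking 'user, bad = r.split()' (excluded by Pre_solution)
def solAStep (h : PySem.Dict String (PySem.Set String) × PySem.Dict String (PySem.Set String))
    (r : String) : PySem.Dict String (PySem.Set String) × PySem.Dict String (PySem.Set String) :=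
  match PySem.Str.split₀ r with
  | [user, bad] =>
      (h.1.modify user PySem.Set.empty (fun s => PySem.Set.add s bad),
       h.2.modify bad PySem.Set.empty (fun s => PySem.Set.add s user))
  | _ => h

-- the body of A's second loop for one index i (answer[i] += 1 becomes List.set)
def solARow (resultHash : PySem.Dict String (PySem.Set String)) (k : Int)
    (reportHash : PySem.Dict String (PySem.Set String)) (id_list : List String)
    (ans : List Int) (i : Int) : List Int :=
  let user := PySem.List.pyGetD id_list i ""
  match reportHash.get? user with
  | none => ans
  | some bads =>
      bads.foldl (fun a bad =>
        if k ≤ ((resultHash.getD bad PySem.Set.empty).length : Int)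
        then a.set i.toNat (a.getD i.toNat 0 + 1) else a) ans

def solution (id_list : List String) (report : List String) (k : Int) : List Int :=
  let hs := report.foldl solAStep (PySem.Dict.empty, PySem.Dict.empty)
  let answer : List Int := (List.range id_list.length).map (fun _ => 0)
  (PySem.List.pyRange 0 (id_list.length : Int) 1).foldl (solARow hs.2 k hs.1 id_list) answer

-- ===== PORT B =====
-- one iteration of B's first loop: reporters.setdefault(bad, set()).add(user)
def solBStep (d : PySem.Dict String (PySem.Set String)) (r : String) :
    PySem.Dict String (PySem.Set String) :=
  match PySem.Str.split₀ r with
  | [user, bad] => d.modify bad PySem.Set.empty (fun s => PySem.Set.add s user)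
  | _ => d

-- B's second loop: tally a reward for every reporter of each bad user with ≥ k reporters
def solBCounts (k : Int) (items : List (String × PySem.Set String)) : PySem.Dict String Int :=
  items.foldl (fun c p =>
    if k ≤ ((p.2 : List String).length : Int)
    then (p.2 : List String).foldl (fun c2 u => c2.modify u 0 (· + 1)) c
    else c) PySem.Dict.empty

def solution_alt (id_list : List String) (report : List String) (k : Int) : List Int :=
  let reporters := report.foldl solBStep PySem.Dict.empty
  let counts := solBCounts k reporters.items
  id_list.map (fun uid => counts.getD uid 0)

-- ===== PRECONDITION & SPEC =====
-- Pre_: every report line splits into exactly two whitespace tokens; otherwise A raises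
-- ValueError at 'user, bad = r.split()'.
def Pre_solution (id_list : List String) (report : List String) (k : Int) : Prop :=
  ∀ r ∈ report, (PySem.Str.split₀ r).length = 2
instance (id_list : List String) (report : List String) (k : Int) : Decidable (Pre_solution id_list report k) := by unfold Pre_solution; infer_instance

def pvWitness_solution : List String × List String × Int :=
  (["muzi", "frodo", "apeach"], ["muzi frodo", "apeach frodo", "muzi frodo"], 2)

def Spec_solution (id_list : List String) (report : List String) (k : Int) (out : List Int) : Prop := out = solution_alt id_list report k
instance (id_list : List String) (report : List String) (k : Int) (out : List Int) : Decidable (Spec_solution id_list report k out) := by unfold Spec_solution; infer_instance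

-- ===== CLAIM (what is proved, stated in full; the proofs are below) =====
def Claim_equal_solution : Prop := ∀ (id_list : List String) (report : List String) (k : Int), Dom_solution id_list report k → Pre_solution id_list report k → Spec_solution id_list report k (solution id_list report k)

-- ===== LEMMAS AND PROOFS =====

-- proof-only helper: the reportHash component of A's first loop, as a standalone fold
def stepRH (d : PySem.Dict String (PySem.Set String)) (r : String) :
    PySem.Dict String (PySem.Set String) :=
  match PySem.Str.split₀ r with
  | [user, bad] => d.modify user PySem.Set.empty (fun s => PySem.Set.add s bad)
  | _ => d

theorem solAStep_eq (h : PySem.Dict String (PySem.Set String) × PySem.Dict String (PySem.Set String))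
    (r : String) : solAStep h r = (stepRH h.1 r, solBStep h.2 r) := by
  obtain ⟨h1, h2⟩ := h
  unfold solAStep stepRH solBStep
  rcases PySem.Str.split₀ r with _ | ⟨u, _ | ⟨b, _ | ⟨c, t⟩⟩⟩ <;> rfl

theorem foldl_solAStep (report : List String) :
    ∀ h, report.foldl solAStep h = (report.foldl stepRH h.1, report.foldl solBStep h.2) := by
  induction report with
  | nil => intro h; cases h; rfl
  | cons r t ih => intro h; simp only [List.foldl_cons, solAStep_eq, ih]

-- joint invariant of A's two mirror dicts / B's single dict over the report loop
theorem build_inv (report : List String) :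
    ∀ (a b : PySem.Dict String (PySem.Set String)),
      (∀ u, (a.getD u PySem.Set.empty).Nodup) →
      (∀ v, (b.getD v PySem.Set.empty).Nodup) →
      b.keys.Nodup →
      (∀ u v, v ∈ a.getD u PySem.Set.empty ↔ u ∈ b.getD v PySem.Set.empty) →
      (∀ u, ((report.foldl stepRH a).getD u PySem.Set.empty).Nodup) ∧
      (∀ v, ((report.foldl solBStep b).getD v PySem.Set.empty).Nodup) ∧
      (report.foldl solBStep b).keys.Nodup ∧
      (∀ u v, v ∈ (report.foldl stepRH a).getD u PySem.Set.empty ↔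
              u ∈ (report.foldl solBStep b).getD v PySem.Set.empty) := by
  induction report with
  | nil => intro a b ha hb hk hab; exact ⟨ha, hb, hk, hab⟩
  | cons r t ih =>
    intro a b ha hb hk hab
    simp only [List.foldl_cons]
    rcases hs : PySem.Str.split₀ r with _ | ⟨u0, _ | ⟨b0, _ | ⟨c0, t0⟩⟩⟩
    · simpa [stepRH, solBStep, hs] using ih a b ha hb hk hab
    · simpa [stepRH, solBStep, hs] using ih a b ha hb hk hab
    case cons.cons.cons =>
      simpa [stepRH, solBStep, hs] using ih a b ha hb hk hab
    case cons.cons.nil =>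
      simp only [stepRH, solBStep, hs]
      apply ih
      · intro u
        rw [PySem.Dict.getD_modify]
        split_ifs with h
        · exact PySem.Set.nodup_add _ _ (ha u0)
        · exact ha u
      · intro v
        rw [PySem.Dict.getD_modify]
        split_ifs with h
        · exact PySem.Set.nodup_add _ _ (hb b0)
        · exact hb v
      · rw [PySem.Dict.keys_modify]
        exact PySem.Dict.nodup_keys_insert _ _ _ hk
      · intro u v
        have hab' : ∀ u v, v ∈ a.getD u PySem.Set.empty ↔ u ∈ b.getD v PySem.Set.empty := hab
        rw [PySem.Dict.getD_modify, PySem.Dict.getD_modify]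
        by_cases hu : u = u0 <;> by_cases hv : v = b0
        · rw [if_pos hu, if_pos hv, hu, hv, PySem.Set.mem_add, PySem.Set.mem_add]
          simp
        · rw [if_pos hu, if_neg hv, hu, PySem.Set.mem_add, or_iff_left hv]
          exact hab' u0 v
        · rw [if_neg hu, if_pos hv, hv, PySem.Set.mem_add, or_iff_left hu]
          exact hab' u b0
        · rw [if_neg hu, if_neg hv]
          exact hab' u v

-- B's counting loop, characterised: each tallied reporter u gets one per qualifying entry
theorem solBCounts_getD_aux (k : Int) (u : String) :
    ∀ (items : List (String × PySem.Set String)) (c : PySem.Dict String Int),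
      (items.foldl (fun c p =>
        if k ≤ (p.2.length : Int)
        then p.2.foldl (fun c2 w => c2.modify w 0 (· + 1)) c
        else c) c).getD u 0
      = c.getD u 0 +
        ((items.filter (fun p => decide (k ≤ (p.2.length : Int)))).map
          (fun p => ((p.2.count u : Nat) : Int))).sum := by
  intro items
  induction items with
  | nil => intro c; simp
  | cons p t ih =>
    intro c
    simp only [List.foldl_cons, List.filter_cons]
    by_cases hp : k ≤ (p.2.length : Int)
    · rw [if_pos hp, ih, PySem.Dict.getD_foldl_modify_add_one]
      simp only [hp, decide_true, if_pos, List.map_cons, List.sum_cons]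
      ring
    · rw [if_neg hp, ih]
      simp [hp]

theorem counts_getD (k : Int) (SH : PySem.Dict String (PySem.Set String))
    (hk : SH.keys.Nodup) (hbN : ∀ v, (SH.getD v PySem.Set.empty).Nodup) (u : String) :
    (solBCounts k SH.items).getD u 0
    = ((SH.keys.countP (fun b => decide (u ∈ SH.getD b PySem.Set.empty) &&
        decide (k ≤ ((SH.getD b PySem.Set.empty).length : Int))) : Nat) : Int) := by
  unfold solBCounts
  rw [solBCounts_getD_aux, PySem.Dict.getD_empty,
      PySem.Dict.items_eq_map_keys SH hk PySem.Set.empty, List.filter_map, List.map_map]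
  rw [zero_add]
  have hcong : ∀ b ∈ SH.keys.filter
      ((fun p => decide (k ≤ ((p.2 : PySem.Set String).length : Int))) ∘
        (fun b => (b, SH.getD b PySem.Set.empty))),
      ((fun p => ((p.2.count u : Nat) : Int)) ∘ (fun b => (b, SH.getD b PySem.Set.empty))) b
      = (fun b => if decide (u ∈ SH.getD b PySem.Set.empty) = true then (1 : Int) else 0) b := by
    intro b _
    simp only [Function.comp_apply]
    by_cases hm : u ∈ SH.getD b PySem.Set.empty
    · rw [List.count_eq_one_of_mem (hbN b) hm, if_pos (decide_eq_true hm)]; norm_num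
    · rw [List.count_eq_zero.2 hm, if_neg (by simpa using hm)]; norm_num
  rw [List.map_congr_left hcong, PySem.List.sum_map_ite_one_zero, List.countP_filter]
  simp only [Function.comp_def]

-- membership bijection: A's per-user count equals B's per-reporter tally
theorem cross_count (RH SH : PySem.Dict String (PySem.Set String))
    (haN : ∀ u, (RH.getD u PySem.Set.empty).Nodup) (hk : SH.keys.Nodup)
    (hab : ∀ u v, v ∈ RH.getD u PySem.Set.empty ↔ u ∈ SH.getD v PySem.Set.empty)
    (k : Int) (u : String) :
    (RH.getD u PySem.Set.empty).countP
        (fun bd => decide (k ≤ ((SH.getD bd PySem.Set.empty).length : Int)))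
    = SH.keys.countP (fun b => decide (u ∈ SH.getD b PySem.Set.empty) &&
        decide (k ≤ ((SH.getD b PySem.Set.empty).length : Int))) := by
  rw [List.countP_eq_length_filter, List.countP_eq_length_filter]
  apply List.Perm.length_eq
  rw [List.perm_ext_iff_of_nodup (List.Nodup.filter _ (haN u)) (List.Nodup.filter _ hk)]
  intro bd
  simp only [List.mem_filter, Bool.and_eq_true, decide_eq_true_eq]
  constructor
  · rintro ⟨hmem, hc⟩
    have hu : u ∈ SH.getD bd PySem.Set.empty := (hab u bd).1 hmem
    refine ⟨?_, hu, hc⟩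
    by_contra hnk
    have hcf : SH.contains bd = false := by
      rcases Bool.eq_false_or_eq_true (SH.contains bd) with h | h
      · exact absurd ((PySem.Dict.contains_iff_mem_keys SH bd).1 h) hnk
      · exact h
    rw [PySem.Dict.getD_of_not_contains _ _ hcf] at hu
    simp [PySem.Set.empty] at hu
  · rintro ⟨_, hu, hc⟩
    exact ⟨(hab u bd).2 hu, hc⟩

-- A's inner loop: repeated answer[i] += 1 is one increment by a countP
theorem foldl_set_count (p : String → Prop) [DecidablePred p] :
    ∀ (l : List String) (a : List Int) (i : Nat), i < a.length →
      l.foldl (fun a bd => if p bd then a.set i (a.getD i 0 + 1) else a) a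
      = a.set i (a.getD i 0 + (l.countP (fun bd => decide (p bd)) : Int)) := by
  intro l
  induction l with
  | nil =>
    intro a i hi
    simp [List.getElem?_eq_getElem hi, List.set_getElem_self]
  | cons b t ih =>
    intro a i hi
    simp only [List.foldl_cons, List.countP_cons]
    by_cases hb : p b
    · rw [if_pos hb, ih _ _ (by simpa using hi)]
      have hset : (a.set i (a.getD i 0 + 1)).getD i 0 = a.getD i 0 + 1 := by
        simp [List.getD_eq_getElem?_getD, List.getElem?_set_self hi]
      rw [hset, List.set_set]
      simp only [hb, decide_true, if_pos]
      congr 1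
      push_cast
      ring
    · rw [if_neg hb, ih _ _ hi]
      simp [hb]

theorem solARow_eq (SH RH : PySem.Dict String (PySem.Set String)) (k : Int)
    (ids : List String) (ans : List Int) (i : Nat) (hi : i < ans.length) :
    solARow SH k RH ids ans (i : Int)
    = ans.set i (ans.getD i 0 +
        ((RH.getD (PySem.List.pyGetD ids (i : Int) "") PySem.Set.empty).countP
          (fun bd => decide (k ≤ ((SH.getD bd PySem.Set.empty).length : Int))) : Int)) := by
  unfold solARow
  rcases hg : RH.get? (PySem.List.pyGetD ids (i : Int) "") with _ | bads
  · have hget : RH.getD (PySem.List.pyGetD ids (i : Int) "") PySem.Set.empty = PySem.Set.empty :=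
      PySem.Dict.getD_of_get?_eq_none _ _ hg
    simp only [hg, hget]
    simp [PySem.Set.empty, List.getElem?_eq_getElem hi, List.set_getElem_self]
  · have hbd : RH.getD (PySem.List.pyGetD ids (i : Int) "") PySem.Set.empty = bads :=
      PySem.Dict.getD_of_get?_eq_some _ _ hg
    simp only [hg, hbd, Int.toNat_natCast]
    exact foldl_set_count (fun bd => k ≤ ((SH.getD bd PySem.Set.empty).length : Int)) bads ans i hi

-- A's index loop over range(len(id_list)) as a mapIdx
theorem foldl_rows (c : Nat → Int) (g : List Int → Int → List Int)
    (hg : ∀ (a : List Int) (i : Nat), i < a.length → g a (i : Int) = a.set i (a.getD i 0 + c i)) :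
    ∀ (m i : Nat) (ans : List Int), i + m = ans.length →
      (PySem.List.pyRange (i : Int) (ans.length : Int) 1).foldl g ans
      = ans.mapIdx (fun j v => if i ≤ j then v + c j else v) := by
  intro m
  induction m with
  | zero =>
    intro i ans hlen
    rw [PySem.List.pyRange_one_eq_nil (by exact_mod_cast (show ans.length ≤ i by omega))]
    simp only [List.foldl_nil]
    refine (List.ext_getElem (by simp) ?_).symm
    intro j h1 h2
    rw [List.getElem_mapIdx]
    rw [if_neg (by omega)]
  | succ m ih =>
    intro i ans hlen
    have hib : (i : Int) < (ans.length : Int) := by exact_mod_cast (by omega : i < ans.length)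
    rw [PySem.List.pyRange_one_cons hib, List.foldl_cons, hg ans i (by omega)]
    have hcast : ((i : Int) + 1) = (((i + 1 : Nat)) : Int) := by push_cast; ring
    have hlen' : (ans.set i (ans.getD i 0 + c i)).length = ans.length := by simp
    rw [hcast, show ((ans.length : Nat) : Int) = (((ans.set i (ans.getD i 0 + c i)).length : Nat) : Int) by rw [hlen'],
        ih (i + 1) _ (by rw [hlen']; omega)]
    refine List.ext_getElem (by simp) ?_
    intro j h1 h2
    rw [List.getElem_mapIdx, List.getElem_mapIdx, List.getElem_set]
    by_cases hij : i = j
    · subst hij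
      rw [if_pos rfl, if_neg (by omega), if_pos (le_refl i), List.getD_eq_getElem ans 0 (by omega)]
    · rw [if_neg hij]
      by_cases hle : i ≤ j
      · rw [if_pos (by omega), if_pos hle]
      · rw [if_neg (by omega), if_neg hle]

-- ===== VERDICT (by name: the statement is the Claim_ definition above) =====
theorem solution_spec : Claim_equal_solution := by
  intro ids report k hdom hpre
  unfold Spec_solution solution solution_alt
  simp only [foldl_solAStep]
  obtain ⟨haN, hbN, hk, hab⟩ := build_inv report PySem.Dict.empty PySem.Dict.empty
    (by intro u; simp [PySem.Dict.getD_empty, PySem.Set.empty])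
    (by intro v; simp [PySem.Dict.getD_empty, PySem.Set.empty])
    (by simp [PySem.Dict.keys_empty])
    (by intro u v; simp [PySem.Dict.getD_empty, PySem.Set.empty])
  set RH := report.foldl stepRH PySem.Dict.empty with hRH
  set SH := report.foldl solBStep PySem.Dict.empty with hSH
  set answer : List Int := (List.range ids.length).map (fun _ => 0) with hans
  have hanslen : answer.length = ids.length := by simp [hans]
  have hA := foldl_rows
    (c := fun j => ((RH.getD (PySem.List.pyGetD ids (j : Int) "") PySem.Set.empty).countP
      (fun bd => decide (k ≤ ((SH.getD bd PySem.Set.empty).length : Int))) : Int))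
    (g := solARow SH k RH ids)
    (hg := fun a i hi => solARow_eq SH RH k ids a i hi)
    ids.length 0 answer (by omega)
  rw [show ((0 : Nat) : Int) = (0 : Int) by norm_num, hanslen] at hA
  rw [hA]
  refine List.ext_getElem (by simp [hanslen]) ?_
  intro j h1 h2
  have hj : j < ids.length := by simpa [hanslen] using h1
  rw [List.getElem_mapIdx, List.getElem_map, if_pos (Nat.zero_le _)]
  simp only [zero_add]
  rw [List.getElem_map]
  rw [PySem.List.pyGetD_natCast ids j "", List.getD_eq_getElem ids "" hj]
  rw [counts_getD k SH hk hbN ids[j]]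
  exact_mod_cast cross_count RH SH haN hk hab k ids[j]
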